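-- pv_equiv track=rewrite | github.com/Ajit-2111/network-security-lab | Playfair-Cipher-Decryption.py | keySquareMatrix
-- ===== SOURCE A (Python) =====
-- def removeDuplicates(text):
--     textList = list(text)
--     uniqueTextList = []
--     for i in textList:
--         if i not in uniqueTextList :
--             uniqueTextList.append(i)
--     stringSplit = ""
--     return stringSplit.join(uniqueTextList)
--
-- def keySquareMatrix(key):
--     appendText = "abcdefghijklmnopqrstuvwxyz"  # This is to be appended to the plainText
--     matrixText = removeDuplicates(key+appendText)
--     if (matrixText.index("i") < matrixText.index("j")):
--         uniqueText = matrixText.replace("j", "")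
--     else:
--         uniqueText = matrixText.replace("i","").replace("j","i")
--     uniqueTextIndex = 0
--     mainMatrix = []
--     for i in range(0, 5):
--         mainMatrixRow = []
--         for j in range(0, 5):
--             mainMatrixRow.append(uniqueText[uniqueTextIndex])
--             uniqueTextIndex += 1
--         mainMatrix.append(mainMatrixRow)
--     return mainMatrix
-- ===== SOURCE B (Python) =====
-- def keySquareMatrix(key):
--     alphabet = "abcdefghijklmnopqrstuvwxyz"
--     stream = key + alphabet
--     merge = stream.index("j") < stream.index("i")  # 'j' first: drop 'i', write 'j' as 'i'
--     dropped = "i" if merge else "j"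
--     seen = set()
--     rows = []
--     row = []
--     count = 0
--     for c in stream:
--         if count == 25:
--             break
--         if c in seen:
--             continue
--         seen.add(c)
--         if c == dropped:
--             continue
--         row.append("i" if (merge and c == "j") else c)
--         if len(row) == 5:
--             rows.append(row)
--             row = []
--         count += 1
--     return rows
-- ===== Notes on version B (the rewrite author's own statement) =====
-- stated objective: faster
-- what changed: A's three separate passes (quadratic list dedup via 'not in' scans, a string replace chain, and a nested 5x5 index loop) are fused into one single traversal of key+alphabet with a hash seen-set that skips duplicates and the dropped letter, substitutes j->i inline, builds the rows directly and stops after 25 placements.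
import Mathlib
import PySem

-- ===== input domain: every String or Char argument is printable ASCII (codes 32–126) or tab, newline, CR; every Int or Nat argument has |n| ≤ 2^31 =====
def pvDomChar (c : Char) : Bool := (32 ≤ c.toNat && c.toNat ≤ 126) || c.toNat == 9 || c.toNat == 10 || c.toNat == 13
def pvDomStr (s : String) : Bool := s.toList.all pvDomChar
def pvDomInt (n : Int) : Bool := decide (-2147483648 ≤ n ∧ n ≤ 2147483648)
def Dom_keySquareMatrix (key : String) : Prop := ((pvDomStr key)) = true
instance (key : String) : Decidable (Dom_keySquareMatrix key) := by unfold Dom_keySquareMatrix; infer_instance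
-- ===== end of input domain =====

-- B fuses A's three passes (quadratic list dedup, replace chain, nested 5x5 reshape) into one
-- traversal of key+alphabet with a hash seen-set that builds the rows directly (objective: faster).

-- ===== PORT A =====
-- literal port of removeDuplicates: list(text), 'not in' scan with append, "".join
def removeDuplicates (text : String) : String :=
  let textList := text.toList
  let uniqueTextList := textList.foldl (fun acc i => if i ∈ acc then acc else acc ++ [i]) ([] : List Char)
  let stringSplit := ""
  PySem.Str.join stringSplit (uniqueTextList.map (fun c => String.mk [c]))

-- .index("i") ported as PySem.Str.find: exact here, since "i" and "j" always occur in
-- matrixText (the alphabet is appended), so .index never raises and equals .find.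
-- uniqueText[idx] ported as pyGet? with getD "": the index stays < 25 ≤ length, never none.
def keySquareMatrix (key : String) : List (List String) :=
  let appendText := "abcdefghijklmnopqrstuvwxyz"
  let matrixText := removeDuplicates (key ++ appendText)
  let uniqueText :=
    if PySem.Str.find matrixText "i" < PySem.Str.find matrixText "j" then
      PySem.Str.replace matrixText "j" ""
    else
      PySem.Str.replace (PySem.Str.replace matrixText "i" "") "j" "i"
  let res := (PySem.List.pyRange 0 5 1).foldl
    (fun (st : List (List String) × Int) _i =>
      let inner := (PySem.List.pyRange 0 5 1).foldl
        (fun (st2 : List String × Int) _j =>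
          (st2.1 ++ [((PySem.Str.pyGet? uniqueText st2.2).map (fun c => String.mk [c])).getD ""], st2.2 + 1))
        (([] : List String), st.2)
      (st.1 ++ [inner.1], inner.2))
    (([] : List (List String)), (0 : Int))
  res.1

-- ===== PORT B =====
-- "i" if (merge and c == "j") else c  (as a 1-char string)
def pvEmit (merge : Bool) (c : Char) : String :=
  if merge && (c == 'j') then "i" else String.mk [c]

-- the single fused loop of Source B: state = (seen, rows, row, count), break at 25
def pvAltGo (merge : Bool) (dropped : Char) :
    List Char → PySem.Set Char → List (List String) → List String → Nat → List (List String)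
  | [], _, rows, _, _ => rows
  | c :: rest, seen, rows, row, count =>
    if count = 25 then rows
    else if PySem.Set.contains seen c then pvAltGo merge dropped rest seen rows row count
    else
      let seen' := PySem.Set.add seen c
      if c = dropped then pvAltGo merge dropped rest seen' rows row count
      else
        let row' := row ++ [pvEmit merge c]
        if row'.length = 5 then pvAltGo merge dropped rest seen' (rows ++ [row']) [] (count + 1)
        else pvAltGo merge dropped rest seen' rows row' (count + 1)

-- .index ported as PySem.Str.find (exact: "i" and "j" always occur in stream)
def keySquareMatrix_alt (key : String) : List (List String) :=
  let alphabet := "abcdefghijklmnopqrstuvwxyz"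
  let stream := key ++ alphabet
  let merge : Bool := decide (PySem.Str.find stream "j" < PySem.Str.find stream "i")
  let dropped := if merge then 'i' else 'j'
  pvAltGo merge dropped stream.toList PySem.Set.empty [] [] 0

-- ===== PRECONDITION & SPEC =====
def Spec_keySquareMatrix (key : String) (out : List (List String)) : Prop := out = keySquareMatrix_alt key
instance (key : String) (out : List (List String)) : Decidable (Spec_keySquareMatrix key out) := by unfold Spec_keySquareMatrix; infer_instance

-- ===== CLAIM (what is proved, stated in full; the proofs are below) =====
def Claim_equal_keySquareMatrix : Prop := ∀ (key : String), Dom_keySquareMatrix key → Spec_keySquareMatrix key (keySquareMatrix key)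

-- ===== LEMMAS AND PROOFS =====

-- A's dedup loop, with its accumulator made explicit
def pvDD (acc l : List Char) : List Char :=
  l.foldl (fun acc i => if i ∈ acc then acc else acc ++ [i]) acc

lemma pvDD_nil (acc : List Char) : pvDD acc [] = acc := rfl

lemma pvDD_cons (acc : List Char) (c : Char) (l : List Char) :
    pvDD acc (c :: l) = pvDD (if c ∈ acc then acc else acc ++ [c]) l := rfl

lemma pvDD_mem (l : List Char) : ∀ (acc : List Char) (x : Char), x ∈ pvDD acc l ↔ x ∈ acc ∨ x ∈ l := by
  induction l with
  | nil => intro acc x; simp [pvDD_nil]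
  | cons c t ih =>
    intro acc x
    rw [pvDD_cons]
    by_cases h : c ∈ acc
    · rw [if_pos h, ih]
      constructor
      · rintro (hx | hx)
        · exact Or.inl hx
        · exact Or.inr (List.mem_cons_of_mem _ hx)
      · rintro (hx | hx)
        · exact Or.inl hx
        · rcases List.mem_cons.mp hx with rfl | hx
          · exact Or.inl h
          · exact Or.inr hx
    · rw [if_neg h, ih]
      simp [List.mem_append, List.mem_cons]
      tauto
  
lemma pvDD_nodup (l : List Char) : ∀ (acc : List Char), acc.Nodup → (pvDD acc l).Nodup := by
  induction l with
  | nil => intro acc h; exact h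
  | cons c t ih =>
    intro acc h
    rw [pvDD_cons]
    by_cases hc : c ∈ acc
    · rw [if_pos hc]; exact ih acc h
    · rw [if_neg hc]
      refine ih _ ?_
      rw [List.nodup_append]
      refine ⟨h, List.nodup_singleton c, ?_⟩
      intro a ha b hb hab
      subst hab
      exact hc ((List.mem_singleton.mp hb) ▸ ha)

lemma pvDD_append (l : List Char) : ∀ (acc : List Char), ∃ t, pvDD acc l = acc ++ t := by
  induction l with
  | nil => intro acc; exact ⟨[], by simp [pvDD_nil]⟩
  | cons c t ih =>
    intro acc
    rw [pvDD_cons]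
    by_cases hc : c ∈ acc
    · rw [if_pos hc]; exact ih acc
    · rw [if_neg hc]
      obtain ⟨r, hr⟩ := ih (acc ++ [c])
      exact ⟨c :: r, by simp [hr]⟩

lemma pvDD_find? (p : Char → Bool) (l : List Char) :
    ∀ (acc : List Char), (∀ x ∈ acc, p x = false) → (pvDD acc l).find? p = l.find? p := by
  induction l with
  | nil =>
    intro acc h
    rw [pvDD_nil]
    exact List.find?_eq_none.mpr (by intro x hx; simp [h x hx])
  | cons c t ih =>
    intro acc h
    rw [pvDD_cons]
    by_cases hc : c ∈ acc
    · rw [if_pos hc, ih acc h, List.find?_cons]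
      have : p c = false := h c hc
      simp [this]
    · rw [if_neg hc]
      by_cases hp : p c = true
      · obtain ⟨r, hr⟩ := pvDD_append t (acc ++ [c])
        rw [hr]
        rw [List.append_assoc]
        rw [List.find?_append]
        rw [List.find?_eq_none.mpr (by intro x hx; simp [h x hx])]
        simp [List.find?_cons, hp]
      · rw [ih (acc ++ [c]) (by intro x hx; rcases List.mem_append.mp hx with hx | hx
                                · exact h x hx
                                · simp at hx; subst hx; simpa using hp)]
        simp [List.find?_cons, hp]

-- idxOf is the least index of an occurrence
lemma pvIdxOf_le (a : Char) (l : List Char) : ∀ (n : Nat), l[n]? = some a → l.idxOf a ≤ n := by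
  induction l with
  | nil => intro n h; simp at h
  | cons c t ih =>
    intro n h
    by_cases hc : c = a
    · subst hc; simp [List.idxOf_cons_self]
    · cases n with
      | zero => simp at h; exact absurd h hc
      | succ m =>
        simp only [List.getElem?_cons_succ] at h
        rw [List.idxOf_cons_ne _ hc]
        exact Nat.succ_le_succ (ih m h)

lemma pvSinglePrefixDrop (a : Char) (l : List Char) (i : Nat) : [a] <+: l.drop i ↔ l[i]? = some a := by
  rw [← List.head?_drop]
  constructor
  · rintro ⟨t, ht⟩; rw [← ht]; rfl
  · intro h
    cases hd : l.drop i with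
    | nil => rw [hd] at h; simp at h
    | cons x t => rw [hd] at h; simp at h; exact ⟨t, by simp [hd, h]⟩

-- single-character .find is idxOf (when present)
lemma pvFindSingle (c : Char) (l : List Char) (h : c ∈ l) :
    PySem.Chars.find l [c] = (l.idxOf c : Int) := by
  have hnn : 0 ≤ PySem.Chars.find l [c] := by
    rw [PySem.Chars.find_nonneg_iff]; exact (List.singleton_infix_iff c l).mpr h
  obtain ⟨h1, h2⟩ := PySem.Chars.find_spec hnn
  rw [pvSinglePrefixDrop] at h1
  have hidx : l.idxOf c < l.length := List.idxOf_lt_length_of_mem h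
  have hle : l.idxOf c ≤ (PySem.Chars.find l [c]).toNat := pvIdxOf_le c l _ h1
  have hge : (PySem.Chars.find l [c]).toNat ≤ l.idxOf c := by
    by_contra hlt
    push_neg at hlt
    exact h2 _ hlt ((pvSinglePrefixDrop c l _).mpr
      (by rw [List.getElem?_eq_getElem hidx, List.getElem_idxOf hidx]))
  omega

lemma pvIdxOfLt_iff_find? (a b : Char) (l : List Char) (ha : a ∈ l) (hb : b ∈ l) (hne : a ≠ b) :
    (l.idxOf a < l.idxOf b) ↔ l.find? (fun c => c == a || c == b) = some a := by
  induction l with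
  | nil => simp at ha
  | cons c t ih =>
    by_cases hca : c = a
    · have hcb : c ≠ b := fun h => hne (hca.symm.trans h)
      rw [List.idxOf_cons_eq _ hca, List.idxOf_cons_ne _ hcb,
        List.find?_cons_of_pos (by simp [hca])]
      simp [hca]
    · by_cases hcb : c = b
      · have hat : a ∈ t := (List.mem_cons.mp ha).resolve_left (fun h => hca h.symm)
        rw [List.idxOf_cons_eq _ hcb, List.idxOf_cons_ne _ hca,
          List.find?_cons_of_pos (by simp [hcb])]
        simp [hca]
      · have hat : a ∈ t := (List.mem_cons.mp ha).resolve_left (fun h => hca h.symm)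
        have hbt : b ∈ t := (List.mem_cons.mp hb).resolve_left (fun h => hcb h.symm)
        rw [List.idxOf_cons_ne _ hca, List.idxOf_cons_ne _ hcb,
          List.find?_cons_of_neg (by simp [hca, hcb])]
        rw [← ih hat hbt]
        omega

-- single-character replace is a flatMap
lemma pvReplaceGoSingle (a : Char) (new : List Char) :
    ∀ (l acc : List Char) (fuel : Nat), l.length ≤ fuel →
      PySem.Chars.replace.go [a] new fuel l acc
        = acc.reverse ++ l.flatMap (fun c => if c = a then new else [c]) := by
  intro l
  induction l with
  | nil =>
    intro acc fuel _
    cases fuel <;> simp [PySem.Chars.replace.go]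
  | cons c t ih =>
    intro acc fuel hf
    cases fuel with
    | zero => simp at hf
    | succ f =>
      simp only [PySem.Chars.replace.go]
      by_cases hc : c = a
      · subst hc
        rw [if_pos (by simp [List.isPrefixOf])]
        simp only [List.length_singleton, List.drop_one, List.tail_cons]
        rw [ih (new.reverse ++ acc) f (by simpa using Nat.le_of_succ_le_succ hf)]
        simp
      · rw [if_neg (by simp [List.isPrefixOf]; exact fun h => hc h.symm)]
        rw [ih (c :: acc) f (by simpa using Nat.le_of_succ_le_succ hf)]
        simp [hc]

lemma pvReplaceSingle (a : Char) (new l : List Char) :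
    PySem.Chars.replace l [a] new = l.flatMap (fun c => if c = a then new else [c]) := by
  rw [PySem.Chars.replace]
  rw [if_neg (by simp)]
  simpa using pvReplaceGoSingle a new l [] l.length (le_refl _)

-- the combined drop/substitute transform both programs perform on the deduped stream
def pvTF (merge : Bool) (l : List Char) : List Char :=
  l.flatMap (fun c => if c = (if merge then 'i' else 'j') then []
                      else [if merge && (c == 'j') then 'i' else c])

lemma pvTF_length (merge : Bool) (l : List Char) :
    (pvTF merge l).length = l.length - l.count (if merge then 'i' else 'j') := by
  induction l with
  | nil => simp [pvTF]
  | cons c t ih =>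
    by_cases hc : c = (if merge then 'i' else 'j')
    · simp only [pvTF, List.flatMap_cons] at *
      rw [if_pos hc]
      have hcount : (c :: t).count (if merge then 'i' else 'j') = t.count (if merge then 'i' else 'j') + 1 := by
        rw [List.count_cons]
        simp [hc]
      rw [hcount]
      have : t.count (if merge then 'i' else 'j') ≤ t.length := List.count_le_length
      simp only [List.nil_append, List.length_cons, ih]
      omega
    · simp only [pvTF, List.flatMap_cons] at *
      rw [if_neg hc]
      have hcount : (c :: t).count (if merge then 'i' else 'j') = t.count (if merge then 'i' else 'j') := by
        rw [List.count_cons]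
        simp [hc]
      rw [hcount]
      have : t.count (if merge then 'i' else 'j') ≤ t.length := List.count_le_length
      simp only [List.cons_append, List.nil_append, List.length_cons, ih]
      omega

lemma pvSingEmit (merge : Bool) (c : Char) :
    String.mk [if merge && (c == 'j') then 'i' else c] = pvEmit merge c := by
  unfold pvEmit
  by_cases h : (merge && (c == 'j')) = true
  · rw [if_pos h, if_pos h]; decide
  · rw [if_neg h, if_neg h]

-- the accepted characters of B's fused loop, without the row/count machinery
def pvEE (merge : Bool) (dropped : Char) : PySem.Set Char → List Char → List String
  | _, [] => []
  | seen, c :: t =>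
    if PySem.Set.contains seen c then pvEE merge dropped seen t
    else if c = dropped then pvEE merge dropped (PySem.Set.add seen c) t
    else pvEmit merge c :: pvEE merge dropped (PySem.Set.add seen c) t

-- row assembly with the stop-at-25 rule, on an already-filtered stream
def pvASM : List (List String) → List String → Nat → List String → List (List String)
  | rows, _, _, [] => rows
  | rows, row, count, g :: t =>
    if count = 25 then rows
    else
      let row' := row ++ [g]
      if row'.length = 5 then pvASM (rows ++ [row']) [] (count + 1) t
      else pvASM rows row' (count + 1) t

lemma pvASM_25 (rows : List (List String)) (row : List String) (l : List String) :
    pvASM rows row 25 l = rows := by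
  cases l <;> simp [pvASM]

lemma pvAltGo_asm (merge : Bool) (dropped : Char) (l : List Char) :
    ∀ (seen : PySem.Set Char) (rows : List (List String)) (row : List String) (count : Nat),
      pvAltGo merge dropped l seen rows row count = pvASM rows row count (pvEE merge dropped seen l) := by
  induction l with
  | nil => intro seen rows row count; simp [pvAltGo, pvEE, pvASM]
  | cons c t ih =>
    intro seen rows row count
    by_cases h25 : count = 25
    · subst h25
      rw [pvASM_25]
      simp [pvAltGo]
    · simp only [pvAltGo, pvEE]
      rw [if_neg h25]
      by_cases hseen : PySem.Set.contains seen c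
      · rw [if_pos hseen, if_pos hseen, ih]
      · rw [if_neg hseen, if_neg hseen]
        by_cases hdrop : c = dropped
        · rw [if_pos hdrop, if_pos hdrop, ih]
        · rw [if_neg hdrop, if_neg hdrop]
          simp only [pvASM]
          rw [if_neg h25, ih, ih]

-- B's fused accept/skip pass equals A's dedup-then-transform, mapped to strings
lemma pvEE_dd (merge : Bool) (l : List Char) :
    ∀ (acc : List Char) (seen : PySem.Set Char),
      (∀ x : Char, x ∈ seen ↔ x ∈ acc) →
      (pvTF merge (pvDD acc l)).map (fun c => String.mk [c])
        = (pvTF merge acc).map (fun c => String.mk [c]) ++ pvEE merge (if merge then 'i' else 'j') seen l := by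
  induction l with
  | nil => intro acc seen h; simp [pvDD_nil, pvEE]
  | cons c t ih =>
    intro acc seen h
    rw [pvDD_cons]
    simp only [pvEE]
    by_cases hc : c ∈ acc
    · rw [if_pos hc, if_pos ((PySem.Set.contains_iff seen c).mpr ((h c).mpr hc))]
      exact ih acc seen h
    · rw [if_neg hc, if_neg (by rw [PySem.Set.contains_iff]; exact fun hx => hc ((h c).mp hx))]
      have hinv : ∀ x : Char, x ∈ PySem.Set.add seen c ↔ x ∈ acc ++ [c] := by
        intro x
        rw [PySem.Set.mem_add, List.mem_append, List.mem_singleton, h x]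
      by_cases hdrop : c = (if merge then 'i' else 'j')
      · rw [if_pos hdrop, ih (acc ++ [c]) _ hinv]
        have : pvTF merge (acc ++ [c]) = pvTF merge acc := by
          simp [pvTF, List.flatMap_append, hdrop]
        rw [this]
      · rw [if_neg hdrop, ih (acc ++ [c]) _ hinv]
        have hstep : pvTF merge (acc ++ [c]) = pvTF merge acc ++ [if merge && (c == 'j') then 'i' else c] := by
          simp [pvTF, List.flatMap_append, hdrop]
        rw [hstep, List.map_append, List.append_assoc]
        simp only [List.map_cons, List.map_nil, List.singleton_append, pvSingEmit]

lemma pvEx25 (u : List Char) (h : 25 ≤ u.length) :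
    ∃ c0 c1 c2 c3 c4 c5 c6 c7 c8 c9 c10 c11 c12 c13 c14 c15 c16 c17 c18 c19 c20 c21 c22 c23 c24 t, u = c0::c1::c2::c3::c4::c5::c6::c7::c8::c9::c10::c11::c12::c13::c14::c15::c16::c17::c18::c19::c20::c21::c22::c23::c24::t := by
  obtain ⟨c0, u, rfl⟩ : ∃ c t, u = c :: t := by cases u with | nil => simp at h | cons a t => exact ⟨a, t, rfl⟩
  simp only [List.length_cons] at h
  obtain ⟨c1, u, rfl⟩ : ∃ c t, u = c :: t := by cases u with | nil => simp at h | cons a t => exact ⟨a, t, rfl⟩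
  simp only [List.length_cons] at h
  obtain ⟨c2, u, rfl⟩ : ∃ c t, u = c :: t := by cases u with | nil => simp at h | cons a t => exact ⟨a, t, rfl⟩
  simp only [List.length_cons] at h
  obtain ⟨c3, u, rfl⟩ : ∃ c t, u = c :: t := by cases u with | nil => simp at h | cons a t => exact ⟨a, t, rfl⟩
  simp only [List.length_cons] at h
  obtain ⟨c4, u, rfl⟩ : ∃ c t, u = c :: t := by cases u with | nil => simp at h | cons a t => exact ⟨a, t, rfl⟩
  simp only [List.length_cons] at h
  obtain ⟨c5, u, rfl⟩ : ∃ c t, u = c :: t := by cases u with | nil => simp at h | cons a t => exact ⟨a, t, rfl⟩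
  simp only [List.length_cons] at h
  obtain ⟨c6, u, rfl⟩ : ∃ c t, u = c :: t := by cases u with | nil => simp at h | cons a t => exact ⟨a, t, rfl⟩
  simp only [List.length_cons] at h
  obtain ⟨c7, u, rfl⟩ : ∃ c t, u = c :: t := by cases u with | nil => simp at h | cons a t => exact ⟨a, t, rfl⟩
  simp only [List.length_cons] at h
  obtain ⟨c8, u, rfl⟩ : ∃ c t, u = c :: t := by cases u with | nil => simp at h | cons a t => exact ⟨a, t, rfl⟩
  simp only [List.length_cons] at h
  obtain ⟨c9, u, rfl⟩ : ∃ c t, u = c :: t := by cases u with | nil => simp at h | cons a t => exact ⟨a, t, rfl⟩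
  simp only [List.length_cons] at h
  obtain ⟨c10, u, rfl⟩ : ∃ c t, u = c :: t := by cases u with | nil => simp at h | cons a t => exact ⟨a, t, rfl⟩
  simp only [List.length_cons] at h
  obtain ⟨c11, u, rfl⟩ : ∃ c t, u = c :: t := by cases u with | nil => simp at h | cons a t => exact ⟨a, t, rfl⟩
  simp only [List.length_cons] at h
  obtain ⟨c12, u, rfl⟩ : ∃ c t, u = c :: t := by cases u with | nil => simp at h | cons a t => exact ⟨a, t, rfl⟩
  simp only [List.length_cons] at h
  obtain ⟨c13, u, rfl⟩ : ∃ c t, u = c :: t := by cases u with | nil => simp at h | cons a t => exact ⟨a, t, rfl⟩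
  simp only [List.length_cons] at h
  obtain ⟨c14, u, rfl⟩ : ∃ c t, u = c :: t := by cases u with | nil => simp at h | cons a t => exact ⟨a, t, rfl⟩
  simp only [List.length_cons] at h
  obtain ⟨c15, u, rfl⟩ : ∃ c t, u = c :: t := by cases u with | nil => simp at h | cons a t => exact ⟨a, t, rfl⟩
  simp only [List.length_cons] at h
  obtain ⟨c16, u, rfl⟩ : ∃ c t, u = c :: t := by cases u with | nil => simp at h | cons a t => exact ⟨a, t, rfl⟩
  simp only [List.length_cons] at h
  obtain ⟨c17, u, rfl⟩ : ∃ c t, u = c :: t := by cases u with | nil => simp at h | cons a t => exact ⟨a, t, rfl⟩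
  simp only [List.length_cons] at h
  obtain ⟨c18, u, rfl⟩ : ∃ c t, u = c :: t := by cases u with | nil => simp at h | cons a t => exact ⟨a, t, rfl⟩
  simp only [List.length_cons] at h
  obtain ⟨c19, u, rfl⟩ : ∃ c t, u = c :: t := by cases u with | nil => simp at h | cons a t => exact ⟨a, t, rfl⟩
  simp only [List.length_cons] at h
  obtain ⟨c20, u, rfl⟩ : ∃ c t, u = c :: t := by cases u with | nil => simp at h | cons a t => exact ⟨a, t, rfl⟩
  simp only [List.length_cons] at h
  obtain ⟨c21, u, rfl⟩ : ∃ c t, u = c :: t := by cases u with | nil => simp at h | cons a t => exact ⟨a, t, rfl⟩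
  simp only [List.length_cons] at h
  obtain ⟨c22, u, rfl⟩ : ∃ c t, u = c :: t := by cases u with | nil => simp at h | cons a t => exact ⟨a, t, rfl⟩
  simp only [List.length_cons] at h
  obtain ⟨c23, u, rfl⟩ : ∃ c t, u = c :: t := by cases u with | nil => simp at h | cons a t => exact ⟨a, t, rfl⟩
  simp only [List.length_cons] at h
  obtain ⟨c24, u, rfl⟩ : ∃ c t, u = c :: t := by cases u with | nil => simp at h | cons a t => exact ⟨a, t, rfl⟩
  simp only [List.length_cons] at h
  exact ⟨c0, c1, c2, c3, c4, c5, c6, c7, c8, c9, c10, c11, c12, c13, c14, c15, c16, c17, c18, c19, c20, c21, c22, c23, c24, u, rfl⟩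

-- the final reshape: A's nested 5x5 indexing loop = B's row assembly, on any stream of ≥ 25 entries
lemma pvFinal (ut : String) (u : List Char) (htl : ut.toList = u) (hlen : 25 ≤ u.length) :
    ((PySem.List.pyRange 0 5 1).foldl
      (fun (st : List (List String) × Int) _i =>
        let inner := (PySem.List.pyRange 0 5 1).foldl
          (fun (st2 : List String × Int) _j =>
            (st2.1 ++ [((PySem.Str.pyGet? ut st2.2).map (fun c => String.mk [c])).getD ""], st2.2 + 1))
          (([] : List String), st.2)
        (st.1 ++ [inner.1], inner.2))
      (([] : List (List String)), (0 : Int))).1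
    = pvASM [] [] 0 (u.map (fun c => String.mk [c])) := by
  obtain ⟨c0, c1, c2, c3, c4, c5, c6, c7, c8, c9, c10, c11, c12, c13, c14, c15, c16, c17, c18, c19, c20, c21, c22, c23, c24, t, rfl⟩ := pvEx25 u hlen
  have hr : PySem.List.pyRange 0 5 1 = [0, 1, 2, 3, 4] := by decide
  have e0 : PySem.List.pyGet? ut.toList (0:Int) = some c0 := by
    rw [htl, show (0:Int) = ((0:Nat):Int) from rfl, PySem.List.pyGet?_natCast]
    rfl
  have e1 : PySem.List.pyGet? ut.toList (1:Int) = some c1 := by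
    rw [htl, show (1:Int) = ((1:Nat):Int) from rfl, PySem.List.pyGet?_natCast]
    rfl
  have e2 : PySem.List.pyGet? ut.toList (2:Int) = some c2 := by
    rw [htl, show (2:Int) = ((2:Nat):Int) from rfl, PySem.List.pyGet?_natCast]
    rfl
  have e3 : PySem.List.pyGet? ut.toList (3:Int) = some c3 := by
    rw [htl, show (3:Int) = ((3:Nat):Int) from rfl, PySem.List.pyGet?_natCast]
    rfl
  have e4 : PySem.List.pyGet? ut.toList (4:Int) = some c4 := by
    rw [htl, show (4:Int) = ((4:Nat):Int) from rfl, PySem.List.pyGet?_natCast]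
    rfl
  have e5 : PySem.List.pyGet? ut.toList (5:Int) = some c5 := by
    rw [htl, show (5:Int) = ((5:Nat):Int) from rfl, PySem.List.pyGet?_natCast]
    rfl
  have e6 : PySem.List.pyGet? ut.toList (6:Int) = some c6 := by
    rw [htl, show (6:Int) = ((6:Nat):Int) from rfl, PySem.List.pyGet?_natCast]
    rfl
  have e7 : PySem.List.pyGet? ut.toList (7:Int) = some c7 := by
    rw [htl, show (7:Int) = ((7:Nat):Int) from rfl, PySem.List.pyGet?_natCast]
    rfl
  have e8 : PySem.List.pyGet? ut.toList (8:Int) = some c8 := by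
    rw [htl, show (8:Int) = ((8:Nat):Int) from rfl, PySem.List.pyGet?_natCast]
    rfl
  have e9 : PySem.List.pyGet? ut.toList (9:Int) = some c9 := by
    rw [htl, show (9:Int) = ((9:Nat):Int) from rfl, PySem.List.pyGet?_natCast]
    rfl
  have e10 : PySem.List.pyGet? ut.toList (10:Int) = some c10 := by
    rw [htl, show (10:Int) = ((10:Nat):Int) from rfl, PySem.List.pyGet?_natCast]
    rfl
  have e11 : PySem.List.pyGet? ut.toList (11:Int) = some c11 := by
    rw [htl, show (11:Int) = ((11:Nat):Int) from rfl, PySem.List.pyGet?_natCast]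
    rfl
  have e12 : PySem.List.pyGet? ut.toList (12:Int) = some c12 := by
    rw [htl, show (12:Int) = ((12:Nat):Int) from rfl, PySem.List.pyGet?_natCast]
    rfl
  have e13 : PySem.List.pyGet? ut.toList (13:Int) = some c13 := by
    rw [htl, show (13:Int) = ((13:Nat):Int) from rfl, PySem.List.pyGet?_natCast]
    rfl
  have e14 : PySem.List.pyGet? ut.toList (14:Int) = some c14 := by
    rw [htl, show (14:Int) = ((14:Nat):Int) from rfl, PySem.List.pyGet?_natCast]
    rfl
  have e15 : PySem.List.pyGet? ut.toList (15:Int) = some c15 := by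
    rw [htl, show (15:Int) = ((15:Nat):Int) from rfl, PySem.List.pyGet?_natCast]
    rfl
  have e16 : PySem.List.pyGet? ut.toList (16:Int) = some c16 := by
    rw [htl, show (16:Int) = ((16:Nat):Int) from rfl, PySem.List.pyGet?_natCast]
    rfl
  have e17 : PySem.List.pyGet? ut.toList (17:Int) = some c17 := by
    rw [htl, show (17:Int) = ((17:Nat):Int) from rfl, PySem.List.pyGet?_natCast]
    rfl
  have e18 : PySem.List.pyGet? ut.toList (18:Int) = some c18 := by
    rw [htl, show (18:Int) = ((18:Nat):Int) from rfl, PySem.List.pyGet?_natCast]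
    rfl
  have e19 : PySem.List.pyGet? ut.toList (19:Int) = some c19 := by
    rw [htl, show (19:Int) = ((19:Nat):Int) from rfl, PySem.List.pyGet?_natCast]
    rfl
  have e20 : PySem.List.pyGet? ut.toList (20:Int) = some c20 := by
    rw [htl, show (20:Int) = ((20:Nat):Int) from rfl, PySem.List.pyGet?_natCast]
    rfl
  have e21 : PySem.List.pyGet? ut.toList (21:Int) = some c21 := by
    rw [htl, show (21:Int) = ((21:Nat):Int) from rfl, PySem.List.pyGet?_natCast]
    rfl
  have e22 : PySem.List.pyGet? ut.toList (22:Int) = some c22 := by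
    rw [htl, show (22:Int) = ((22:Nat):Int) from rfl, PySem.List.pyGet?_natCast]
    rfl
  have e23 : PySem.List.pyGet? ut.toList (23:Int) = some c23 := by
    rw [htl, show (23:Int) = ((23:Nat):Int) from rfl, PySem.List.pyGet?_natCast]
    rfl
  have e24 : PySem.List.pyGet? ut.toList (24:Int) = some c24 := by
    rw [htl, show (24:Int) = ((24:Nat):Int) from rfl, PySem.List.pyGet?_natCast]
    rfl
  rw [hr]
  simp only [List.foldl_cons, List.foldl_nil]
  norm_num [e0, e1, e2, e3, e4, e5, e6, e7, e8, e9, e10, e11, e12, e13, e14, e15, e16, e17, e18,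
    e19, e20, e21, e22, e23, e24]
  simp [pvASM, pvASM_25]

-- composite of the two replaces in A's else-branch
lemma pvCompose (l : List Char) :
    (l.flatMap (fun c => if c = 'i' then [] else [c])).flatMap (fun c => if c = 'j' then ['i'] else [c])
      = pvTF true l := by
  induction l with
  | nil => rfl
  | cons c t ih =>
    simp only [List.flatMap_cons, List.flatMap_append, ih]
    by_cases h1 : c = 'i'
    · simp [pvTF, h1]
    · by_cases h2 : c = 'j' <;> simp [pvTF, h1, h2]

set_option maxHeartbeats 1600000 in
theorem keySquareMatrix_spec : Claim_equal_keySquareMatrix := by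
  unfold Claim_equal_keySquareMatrix
  intro key _dom
  unfold Spec_keySquareMatrix
  obtain ⟨sl, hsl⟩ : ∃ l : List Char, key.toList ++ "abcdefghijklmnopqrstuvwxyz".toList = l := ⟨_, rfl⟩
  have hsL : (key ++ "abcdefghijklmnopqrstuvwxyz").toList = sl := by rw [← hsl]; simp
  have halpha : ∀ x : Char, x ∈ "abcdefghijklmnopqrstuvwxyz".toList → x ∈ sl :=
    fun x hx => hsl ▸ List.mem_append_right _ hx
  have hiS : 'i' ∈ sl := halpha _ (by decide)
  have hjS : 'j' ∈ sl := halpha _ (by decide)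
  have hm : (removeDuplicates (key ++ "abcdefghijklmnopqrstuvwxyz")).toList = pvDD [] sl := by
    unfold removeDuplicates pvDD
    rw [PySem.Str.toList_join, List.map_map]
    have h1 : (String.toList ∘ fun c : Char => String.mk [c]) = fun c : Char => [c] := by
      funext c; exact Eq.symm ((fun {l} {s} => String.ofList_eq.mp) rfl)
    rw [h1, show "".toList = ([] : List Char) from rfl, PySem.Chars.join_nil_singletons, hsL]
  have hiM : 'i' ∈ pvDD [] sl := (pvDD_mem sl [] 'i').mpr (Or.inr hiS)
  have hjM : 'j' ∈ pvDD [] sl := (pvDD_mem sl [] 'j').mpr (Or.inr hjS)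
  have hnodupM : (pvDD [] sl).Nodup := pvDD_nodup sl [] List.nodup_nil
  have hlenM : 26 ≤ (pvDD [] sl).length := by
    have hsub : "abcdefghijklmnopqrstuvwxyz".toList ⊆ pvDD [] sl :=
      fun x hx => (pvDD_mem sl [] x).mpr (Or.inr (halpha x hx))
    have h26 := List.Subperm.length_le (List.subperm_of_subset (by decide) hsub)
    simpa using h26
  have hfq : (pvDD [] sl).find? (fun c => c == 'i' || c == 'j')
      = sl.find? (fun c => c == 'i' || c == 'j') := pvDD_find? _ sl [] (by simp)
  have hxE : sl.find? (fun c => c == 'i' || c == 'j') = some 'i'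
      ∨ sl.find? (fun c => c == 'i' || c == 'j') = some 'j' := by
    have h1 : (sl.find? (fun c => c == 'i' || c == 'j')).isSome = true :=
      List.find?_isSome.mpr ⟨'i', hiS, by decide⟩
    obtain ⟨x, hx⟩ := Option.isSome_iff_exists.mp h1
    have h2 := List.find?_some hx
    have h3 : x = 'i' ∨ x = 'j' := by simpa using h2
    rcases h3 with rfl | rfl
    · exact Or.inl hx
    · exact Or.inr hx
  have condA : (PySem.Str.find (removeDuplicates (key ++ "abcdefghijklmnopqrstuvwxyz")) "i"
        < PySem.Str.find (removeDuplicates (key ++ "abcdefghijklmnopqrstuvwxyz")) "j")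
      ↔ sl.find? (fun c => c == 'i' || c == 'j') = some 'i' := by
    rw [PySem.Str.find_eq, PySem.Str.find_eq, hm,
      show "i".toList = ['i'] from rfl, show "j".toList = ['j'] from rfl,
      pvFindSingle _ _ hiM, pvFindSingle _ _ hjM, Nat.cast_lt,
      pvIdxOfLt_iff_find? 'i' 'j' _ hiM hjM (by decide), hfq]
  have condB : (PySem.Str.find (key ++ "abcdefghijklmnopqrstuvwxyz") "j"
        < PySem.Str.find (key ++ "abcdefghijklmnopqrstuvwxyz") "i")
      ↔ sl.find? (fun c => c == 'i' || c == 'j') = some 'j' := by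
    rw [PySem.Str.find_eq, PySem.Str.find_eq, hsL,
      show "i".toList = ['i'] from rfl, show "j".toList = ['j'] from rfl,
      pvFindSingle _ _ hjS, pvFindSingle _ _ hiS, Nat.cast_lt,
      pvIdxOfLt_iff_find? 'j' 'i' _ hjS hiS (by decide),
      show (fun c : Char => c == 'j' || c == 'i') = (fun c => c == 'i' || c == 'j') from
        funext (fun c => Bool.or_comm _ _)]
  rcases hxE with hx | hx
  · -- "i" comes first: A keeps i, drops j; B has merge = false
    have hcA : PySem.Str.find (removeDuplicates (key ++ "abcdefghijklmnopqrstuvwxyz")) "i"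
        < PySem.Str.find (removeDuplicates (key ++ "abcdefghijklmnopqrstuvwxyz")) "j" := condA.mpr hx
    have hcB : ¬ (PySem.Str.find (key ++ "abcdefghijklmnopqrstuvwxyz") "j"
        < PySem.Str.find (key ++ "abcdefghijklmnopqrstuvwxyz") "i") :=
      fun h => absurd ((condB.mp h).symm.trans hx) (by decide)
    have htl1 : (PySem.Str.replace (removeDuplicates (key ++ "abcdefghijklmnopqrstuvwxyz")) "j" "").toList
        = pvTF false (pvDD [] sl) := by
      rw [PySem.Str.toList_replace, hm, show "j".toList = ['j'] from rfl,
        show "".toList = ([] : List Char) from rfl, pvReplaceSingle]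
      simp [pvTF]
    have hcount : (pvDD [] sl).count 'j' = 1 := List.count_eq_one_of_mem hnodupM hjM
    have hlen1 : 25 ≤ (pvTF false (pvDD [] sl)).length := by
      rw [pvTF_length]
      simp only [Bool.false_eq_true, if_false]
      omega
    have hA : keySquareMatrix key
        = pvASM [] [] 0 ((pvTF false (pvDD [] sl)).map (fun c => String.mk [c])) := by
      simp only [keySquareMatrix]
      rw [if_pos hcA]
      exact pvFinal _ _ htl1 hlen1
    have hB : keySquareMatrix_alt key
        = pvASM [] [] 0 ((pvTF false (pvDD [] sl)).map (fun c => String.mk [c])) := by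
      simp only [keySquareMatrix_alt]
      rw [show decide (PySem.Str.find (key ++ "abcdefghijklmnopqrstuvwxyz") "j"
          < PySem.Str.find (key ++ "abcdefghijklmnopqrstuvwxyz") "i") = false from decide_eq_false hcB]
      norm_num
      rw [hsl, pvAltGo_asm]
      have hEE := pvEE_dd false sl [] PySem.Set.empty (by intro x; simp [PySem.Set.empty])
      rw [show pvTF false ([] : List Char) = [] from rfl] at hEE
      simp only [List.map_nil, List.nil_append] at hEE
      norm_num at hEE
      exact congrArg (pvASM [] [] 0) hEE.symm
    rw [hA, hB]
  · -- "j" comes first: A drops i and renames j to i; B has merge = true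
    have hcA : ¬ (PySem.Str.find (removeDuplicates (key ++ "abcdefghijklmnopqrstuvwxyz")) "i"
        < PySem.Str.find (removeDuplicates (key ++ "abcdefghijklmnopqrstuvwxyz")) "j") :=
      fun h => absurd ((condA.mp h).symm.trans hx) (by decide)
    have hcB : PySem.Str.find (key ++ "abcdefghijklmnopqrstuvwxyz") "j"
        < PySem.Str.find (key ++ "abcdefghijklmnopqrstuvwxyz") "i" := condB.mpr hx
    have htl2 : (PySem.Str.replace (PySem.Str.replace (removeDuplicates (key ++ "abcdefghijklmnopqrstuvwxyz")) "i" "") "j" "i").toList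
        = pvTF true (pvDD [] sl) := by
      rw [PySem.Str.toList_replace, PySem.Str.toList_replace, hm,
        show "i".toList = ['i'] from rfl, show "j".toList = ['j'] from rfl,
        show "".toList = ([] : List Char) from rfl, pvReplaceSingle, pvReplaceSingle, pvCompose]
    have hcount : (pvDD [] sl).count 'i' = 1 := List.count_eq_one_of_mem hnodupM hiM
    have hlen2 : 25 ≤ (pvTF true (pvDD [] sl)).length := by
      rw [pvTF_length]
      simp only [if_true]
      omega
    have hA : keySquareMatrix key
        = pvASM [] [] 0 ((pvTF true (pvDD [] sl)).map (fun c => String.mk [c])) := by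
      simp only [keySquareMatrix]
      rw [if_neg hcA]
      exact pvFinal _ _ htl2 hlen2
    have hB : keySquareMatrix_alt key
        = pvASM [] [] 0 ((pvTF true (pvDD [] sl)).map (fun c => String.mk [c])) := by
      simp only [keySquareMatrix_alt]
      rw [show decide (PySem.Str.find (key ++ "abcdefghijklmnopqrstuvwxyz") "j"
          < PySem.Str.find (key ++ "abcdefghijklmnopqrstuvwxyz") "i") = true from decide_eq_true hcB]
      norm_num
      rw [hsl, pvAltGo_asm]
      have hEE := pvEE_dd true sl [] PySem.Set.empty (by intro x; simp [PySem.Set.empty])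
      rw [show pvTF true ([] : List Char) = [] from rfl] at hEE
      simp only [List.map_nil, List.nil_append] at hEE
      norm_num at hEE
      exact congrArg (pvASM [] [] 0) hEE.symm
    rw [hA, hB]
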